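-- pv_equiv track=rewrite | github.com/telekom/3gpp-meeting-tools | 3GPP Meeting Helper/parsing/excel.py | get_colors_from_comments
-- ===== SOURCE A (Python) =====
-- def get_reddest_color(colors):
--     try:
--         sorted_colors = sorted(colors, key=lambda x: int(x[2:4], 16))
--         return sorted_colors[-1]
--     except:
--         return '00000000'
--
-- def get_colors_from_comments(comments):
--     fg_colors = {}
--     text_colors = {}
--     if comments is None:
--         return fg_colors, text_colors
--     for tdoc, comments in comments.items():
--         fg_colors_comments = [comment_data[2] for comment_data in comments]
--         text_colors_comments = [comment_data[3] for comment_data in comments]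
--
--         reddest_fg_color = get_reddest_color(fg_colors_comments)
--         reddest_text_color = get_reddest_color(text_colors_comments)
--
--         fg_colors[tdoc] = reddest_fg_color
--         text_colors[tdoc] = reddest_text_color
--     return fg_colors, text_colors
-- ===== SOURCE B (Python) =====
-- def _reddest(colors):
--     best = None
--     best_key = 0
--     try:
--         for x in colors:
--             k = int(x[2:4], 16)
--             if best is None or k >= best_key:
--                 best, best_key = x, k
--         return '00000000' if best is None else best
--     except:
--         return '00000000'
--
-- def get_colors_from_comments(comments):
--     if comments is None:
--         return {}, {}
--     fg_colors = {tdoc: _reddest([c[2] for c in cs]) for tdoc, cs in comments.items()}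
--     text_colors = {tdoc: _reddest([c[3] for c in cs]) for tdoc, cs in comments.items()}
--     return fg_colors, text_colors
-- ===== Notes on version B (the rewrite author's own statement) =====
-- stated objective: alternative
-- what changed: get_reddest_color's sort-then-take-last is replaced by a single linear scan keeping the last element with the maximal red component (>= update), and the wrapper builds the two dicts with two comprehensions instead of one loop mutating both.
import Mathlib
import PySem

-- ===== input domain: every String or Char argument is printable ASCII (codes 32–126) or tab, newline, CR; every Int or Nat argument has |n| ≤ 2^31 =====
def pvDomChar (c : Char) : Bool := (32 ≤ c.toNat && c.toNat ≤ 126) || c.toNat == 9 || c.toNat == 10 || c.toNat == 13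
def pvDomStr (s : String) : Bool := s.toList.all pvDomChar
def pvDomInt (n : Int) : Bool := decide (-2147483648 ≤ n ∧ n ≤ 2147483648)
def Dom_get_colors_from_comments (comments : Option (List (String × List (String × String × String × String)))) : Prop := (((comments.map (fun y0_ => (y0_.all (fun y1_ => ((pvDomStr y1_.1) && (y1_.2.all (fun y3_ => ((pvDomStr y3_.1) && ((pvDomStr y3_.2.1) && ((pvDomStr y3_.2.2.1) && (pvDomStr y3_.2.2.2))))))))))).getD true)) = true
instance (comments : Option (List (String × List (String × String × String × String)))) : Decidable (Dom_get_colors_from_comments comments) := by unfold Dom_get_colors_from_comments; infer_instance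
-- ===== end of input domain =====

-- B replaces the sort-and-take-last of get_reddest_color by a single linear scan (alternative algorithm, same results).

-- ===== PORT A =====
-- int(x[2:4], 16); none = the ValueError A's bare except catches
def pvKey? (x : String) : Option Int := PySem.Int.ofStrBase? (PySem.Str.slice x (some 2) (some 4)) 16
def pvKey (x : String) : Int := (pvKey? x).getD 0

-- try: sorted(colors, key=...)[-1] except: '00000000'  — the key is evaluated on every
-- element (any failure → default), and an empty list's [-1] raises IndexError → default
def get_reddest_color (colors : List String) : String :=
  if colors.all (fun x => (pvKey? x).isSome) then
    match (PySem.List.sorted colors pvKey).getLast? with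
    | some c => c
    | none => "00000000"
  else "00000000"

def get_colors_from_comments (comments : Option (List (String × List (String × String × String × String)))) : (List (String × String)) × (List (String × String)) :=
  match comments with
  | none => ([], [])
  | some items =>
    let p := items.foldl
      (fun (p : PySem.Dict String String × PySem.Dict String String) it =>
        (p.1.insert it.1 (get_reddest_color (it.2.map (fun c => c.2.2.1))),
         p.2.insert it.1 (get_reddest_color (it.2.map (fun c => c.2.2.2)))))
      (PySem.Dict.empty, PySem.Dict.empty)
    (p.1.items, p.2.items)

-- ===== PORT B =====
-- the scan loop of _reddest: best/best_key state; a parse failure anywhere → '00000000'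
def pvRedScan (l : List String) (acc : Option (String × Int)) : String :=
  match l with
  | [] => (match acc with | none => "00000000" | some b => b.1)
  | x :: xs =>
    match pvKey? x with
    | none => "00000000"
    | some k =>
      match acc with
      | none => pvRedScan xs (some (x, k))
      | some (b, bk) => if bk ≤ k then pvRedScan xs (some (x, k)) else pvRedScan xs (some (b, bk))

def pvReddestAlt (colors : List String) : String := pvRedScan colors none

def get_colors_from_comments_alt (comments : Option (List (String × List (String × String × String × String)))) : (List (String × String)) × (List (String × String)) :=
  match comments with
  | none => ([], [])
  | some items =>
    ((items.foldl (fun d it => d.insert it.1 (pvReddestAlt (it.2.map (fun c => c.2.2.1)))) PySem.Dict.empty).items,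
     (items.foldl (fun d it => d.insert it.1 (pvReddestAlt (it.2.map (fun c => c.2.2.2)))) PySem.Dict.empty).items)

-- ===== PRECONDITION & SPEC =====
def Spec_get_colors_from_comments (comments : Option (List (String × List (String × String × String × String)))) (out : (List (String × String)) × (List (String × String))) : Prop := out = get_colors_from_comments_alt comments
instance (comments : Option (List (String × List (String × String × String × String)))) (out : (List (String × String)) × (List (String × String))) : Decidable (Spec_get_colors_from_comments comments out) := by unfold Spec_get_colors_from_comments; infer_instance

-- ===== CLAIM (what is proved, stated in full; the proofs are below) =====
def Claim_equal_get_colors_from_comments : Prop := ∀ (comments : Option (List (String × List (String × String × String × String)))), Dom_get_colors_from_comments comments → Spec_get_colors_from_comments comments (get_colors_from_comments comments)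

-- ===== LEMMAS AND PROOFS =====

-- in a ≤-pairwise list the last element is maximal
theorem pv_key_le_last : ∀ (l : List String) (b : String),
    l.Pairwise (fun a c => pvKey a ≤ pvKey c) → l.getLast? = some b →
    ∀ a ∈ l, pvKey a ≤ pvKey b := by
  intro l
  induction l with
  | nil => intro b _ h; simp at h
  | cons x t ih =>
    intro b hp hl a ha
    cases t with
    | nil =>
      simp at hl ha; subst hl; subst ha; exact le_refl _
    | cons y t' =>
      rw [List.getLast?_cons_cons] at hl
      rcases List.mem_cons.mp ha with rfl | hmem
      · have hb : b ∈ y :: t' := List.mem_of_getLast? hl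
        exact (List.pairwise_cons.mp hp).1 b hb
      · exact ih b (List.pairwise_cons.mp hp).2 hl a hmem

theorem pv_insertBy_ne_nil (bef : String → String → Bool) (x : String) :
    ∀ (l : List String), PySem.List.insertBy bef x l ≠ [] := by
  intro l; cases l with
  | nil => simp [PySem.List.insertBy]
  | cons a t =>
    simp only [PySem.List.insertBy]
    split <;> simp

-- inserting a strictly smaller element leaves the last element unchanged
theorem pv_getLast?_insertBy_of_lt (x : String) :
    ∀ (l : List String) (b : String), l.getLast? = some b → pvKey x < pvKey b →
    (PySem.List.insertBy (fun a c => decide (pvKey a < pvKey c)) x l).getLast? = some b := by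
  intro l
  induction l with
  | nil => intro b h; simp at h
  | cons a t ih =>
    intro b hl hlt
    simp only [PySem.List.insertBy]
    split
    · rw [List.getLast?_cons_cons]; exact hl
    · rename_i hfalse
      cases t with
      | nil =>
        simp at hl; subst hl
        simp [decide_eq_true hlt] at hfalse
      | cons y t' =>
        rw [List.getLast?_cons_cons] at hl
        have := ih b hl hlt
        rcases hne : PySem.List.insertBy (fun a c => decide (pvKey a < pvKey c)) x (y :: t') with _ | ⟨z, zs⟩
        · exact absurd hne (pv_insertBy_ne_nil _ _ _)
        · rw [hne] at this
          rw [List.getLast?_cons_cons]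
          exact this

-- main invariant: scanning `rest` from best (b, pvKey b) tracks the last element of the stable sort
theorem pv_scan_main : ∀ (rest pre : List String) (b : String),
    rest.all (fun x => (pvKey? x).isSome) = true →
    (PySem.List.sorted pre pvKey).getLast? = some b →
    (PySem.List.sorted (pre ++ rest) pvKey).getLast? = some (pvRedScan rest (some (b, pvKey b))) := by
  intro rest
  induction rest with
  | nil => intro pre b _ hl; rw [pvRedScan.eq_def]; simpa using hl
  | cons x rest ih =>
    intro pre b hall hl
    have hsplit : (pvKey? x).isSome = true ∧ rest.all (fun x => (pvKey? x).isSome) = true := by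
      simpa using hall
    obtain ⟨hx, hall'⟩ := hsplit
    rcases hk : pvKey? x with _ | k
    · rw [hk] at hx; simp at hx
    have hkey : pvKey x = k := by simp [pvKey, hk]
    have hsx : PySem.List.sorted (pre ++ [x]) pvKey =
        PySem.List.insertBy (fun a c => decide (pvKey a < pvKey c)) x (PySem.List.sorted pre pvKey) := by
      rw [PySem.List.sorted_eq_foldl_insertBy, PySem.List.sorted_eq_foldl_insertBy, List.foldl_append]
      rfl
    have hassoc : pre ++ x :: rest = (pre ++ [x]) ++ rest := by simp
    rw [pvRedScan.eq_def]
    simp only [hk]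
    by_cases hcmp : pvKey b ≤ k
    · -- x becomes the new best; insertBy appends it at the very end
      have happ : PySem.List.insertBy (fun a c => decide (pvKey a < pvKey c)) x (PySem.List.sorted pre pvKey)
          = PySem.List.sorted pre pvKey ++ [x] := by
        apply PySem.List.insertBy_of_forall_not_before
        intro y hy
        have hy' : pvKey y ≤ pvKey b :=
          pv_key_le_last _ b (PySem.List.sorted_pairwise pre pvKey) hl y hy
        simp only [decide_eq_false_iff_not, hkey]
        omega
      have hl' : (PySem.List.sorted (pre ++ [x]) pvKey).getLast? = some x := by
        rw [hsx, happ, List.getLast?_concat]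
      rw [hassoc, if_pos hcmp, ← hkey]
      exact ih (pre ++ [x]) x hall' hl'
    · -- x is strictly smaller: the last element stays b
      have hl' : (PySem.List.sorted (pre ++ [x]) pvKey).getLast? = some b := by
        rw [hsx]
        exact pv_getLast?_insertBy_of_lt x _ b hl (by omega)
      rw [hassoc, if_neg hcmp]
      exact ih (pre ++ [x]) b hall' hl'

-- a parse failure anywhere makes the scan return the default, whatever the state
theorem pv_scan_fail : ∀ (l : List String) (acc : Option (String × Int)),
    l.all (fun x => (pvKey? x).isSome) = false → pvRedScan l acc = "00000000" := by
  intro l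
  induction l with
  | nil => intro acc h; simp at h
  | cons x t ih =>
    intro acc h
    rw [pvRedScan.eq_def]
    rcases hk : pvKey? x with _ | k
    · simp only [hk]
    · have ht : t.all (fun x => (pvKey? x).isSome) = false := by
        simp only [List.all_cons, hk, Option.isSome_some, Bool.true_and] at h
        exact h
      simp only [hk]
      cases acc with
      | none => exact ih _ ht
      | some b =>
        cases b
        simp only
        split <;> exact ih _ ht

theorem pv_reddest_eq : ∀ (colors : List String), get_reddest_color colors = pvReddestAlt colors := by
  intro colors
  unfold get_reddest_color pvReddestAlt
  by_cases hall : colors.all (fun x => (pvKey? x).isSome) = true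
  · rw [if_pos hall]
    cases colors with
    | nil => rw [pvRedScan.eq_def]; simp [PySem.List.sorted_eq_foldl_insertBy]
    | cons x rest =>
      have hsplit : (pvKey? x).isSome = true ∧ rest.all (fun x => (pvKey? x).isSome) = true := by
        simpa using hall
      obtain ⟨hx, hall'⟩ := hsplit
      rcases hk : pvKey? x with _ | k
      · rw [hk] at hx; simp at hx
      have hkey : pvKey x = k := by simp [pvKey, hk]
      have hone : (PySem.List.sorted [x] pvKey).getLast? = some x := by
        simp [PySem.List.sorted_eq_foldl_insertBy, PySem.List.insertBy]
      have hmain := pv_scan_main rest [x] x hall' hone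
      simp only [List.singleton_append] at hmain
      have hrhs : pvRedScan (x :: rest) none = pvRedScan rest (some (x, k)) := by
        rw [pvRedScan.eq_def]; simp only [hk]
      rw [hmain, hrhs, hkey]
  · rw [if_neg hall]
    rw [pv_scan_fail colors none (by simpa using hall)]

theorem pv_foldl_pair_split {α β γ : Type} (f : β → α → β) (g : γ → α → γ) :
    ∀ (l : List α) (b : β) (c : γ),
      l.foldl (fun p x => (f p.1 x, g p.2 x)) (b, c) = (l.foldl f b, l.foldl g c) := by
  intro l
  induction l with
  | nil => intro b c; rfl
  | cons x t ih => intro b c; simp only [List.foldl_cons]; exact ih (f b x) (g c x)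

-- ===== VERDICT (by name: the statement is the Claim_ definition above) =====
theorem get_colors_from_comments_spec : Claim_equal_get_colors_from_comments := by
  unfold Claim_equal_get_colors_from_comments
  intro comments _
  unfold Spec_get_colors_from_comments get_colors_from_comments get_colors_from_comments_alt
  cases comments with
  | none => rfl
  | some items =>
    simp only
    rw [pv_foldl_pair_split
      (fun (d : PySem.Dict String String) (it : String × List (String × String × String × String)) =>
        PySem.Dict.insert d it.1 (get_reddest_color (it.2.map (fun c => c.2.2.1))))
      (fun (d : PySem.Dict String String) (it : String × List (String × String × String × String)) =>
        PySem.Dict.insert d it.1 (get_reddest_color (it.2.map (fun c => c.2.2.2))))]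
    have : get_reddest_color = pvReddestAlt := funext pv_reddest_eq
    rw [this]
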